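-- pv_equiv track=rewrite | github.com/Mohammad-alhossiny/AdventOfCode | 2015/Day11.py | has_douples
-- ===== SOURCE A (Python) =====
-- def has_douples(in_list):
--     n_ds = 0
--     skip_next = False
--
--     for i in range(len(in_list) - 1):
--         if not skip_next:
--             if (in_list[i] == (in_list[i+1])):
--                 n_ds += 1
--                 skip_next = True
--         else:
--             skip_next = False
--         if n_ds >= 2:
--             return True
--     return False
-- ===== SOURCE B (Python) =====
-- def has_douples(in_list):
--     pairs = [i for i in range(len(in_list) - 1) if in_list[i] == in_list[i + 1]]
--     need = 0
--     cnt = 0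
--     for p in pairs:
--         if p >= need:
--             cnt += 1
--             need = p + 2
--             if cnt == 2:
--                 return True
--     return False
-- ===== Notes on version B (the rewrite author's own statement) =====
-- stated objective: alternative
-- what changed: A's single stateful scan with a skip_next flag is replaced by two passes: first collect all adjacent-duplicate indices with a comprehension, then a greedy scan over that index list with an earliest-allowed-start variable (need = p + 2) enforcing non-overlap.
import Mathlib
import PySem

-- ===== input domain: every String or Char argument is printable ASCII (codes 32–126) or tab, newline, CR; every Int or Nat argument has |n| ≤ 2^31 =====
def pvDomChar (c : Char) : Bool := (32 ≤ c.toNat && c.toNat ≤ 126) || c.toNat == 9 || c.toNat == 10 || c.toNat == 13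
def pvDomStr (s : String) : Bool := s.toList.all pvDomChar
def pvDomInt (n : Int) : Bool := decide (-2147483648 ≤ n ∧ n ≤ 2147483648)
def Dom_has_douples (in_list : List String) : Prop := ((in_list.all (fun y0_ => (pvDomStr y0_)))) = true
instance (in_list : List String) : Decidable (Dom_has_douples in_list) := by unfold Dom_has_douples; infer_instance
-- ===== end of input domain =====

-- B replaces A's single stateful scan (skip_next flag) by a pair-index comprehension followed by
-- a greedy pass with an earliest-allowed-start variable; alternative decomposition, same cost.

-- ===== PORT A =====
-- A's for-loop over range(len(in_list) - 1) with state (n_ds, skip_next) and the early return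
def hdLoopA (xs : List String) : List Int → Int → Bool → Bool
  | [], _, _ => false
  | i :: rest, n_ds, skip_next =>
    let st :=
      if !skip_next then
        if PySem.List.pyGet? xs i == PySem.List.pyGet? xs (i + 1) then (n_ds + 1, true)
        else (n_ds, skip_next)
      else (n_ds, false)
    if st.1 ≥ 2 then true else hdLoopA xs rest st.1 st.2

def has_douples (in_list : List String) : Bool :=
  hdLoopA in_list (PySem.List.pyRange 0 ((in_list.length : Int) - 1) 1) 0 false

-- ===== PORT B =====
-- B's greedy pass over the collected pair-start indices (need = earliest allowed next start)
def hdGreedy : List Int → Int → Int → Bool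
  | [], _, _ => false
  | p :: rest, need, cnt =>
    if p ≥ need then
      if cnt + 1 = 2 then true else hdGreedy rest (p + 2) (cnt + 1)
    else hdGreedy rest need cnt

def has_douples_alt (in_list : List String) : Bool :=
  let pairs := (PySem.List.pyRange 0 ((in_list.length : Int) - 1) 1).filter
    (fun i => PySem.List.pyGet? in_list i == PySem.List.pyGet? in_list (i + 1))
  hdGreedy pairs 0 0

-- ===== PRECONDITION & SPEC =====
def Spec_has_douples (in_list : List String) (out : Bool) : Prop := out = has_douples_alt in_list
instance (in_list : List String) (out : Bool) : Decidable (Spec_has_douples in_list out) := by unfold Spec_has_douples; infer_instance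

-- ===== CLAIM (what is proved, stated in full; the proofs are below) =====
def Claim_equal_has_douples : Prop := ∀ (in_list : List String), Dom_has_douples in_list → Spec_has_douples in_list (has_douples in_list)

-- ===== LEMMAS AND PROOFS =====

-- loop invariant: A's scan from index a with state (n, skip) matches B's greedy pass on the
-- filtered pair indices of the same range, where `need` encodes the skip flag (need = a+1 iff skip)
theorem hd_inv (xs : List String) : ∀ (k : Nat) (a b n need : Int) (skip : Bool),
    (b - a).toNat = k → 0 ≤ n → n ≤ 1 →
    (if skip then need = a + 1 else need ≤ a) →
    hdLoopA xs (PySem.List.pyRange a b 1) n skip =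
      hdGreedy ((PySem.List.pyRange a b 1).filter
        (fun i => PySem.List.pyGet? xs i == PySem.List.pyGet? xs (i + 1))) need n := by
  intro k
  induction k with
  | zero =>
    intro a b n need skip hk h0 h1 hneed
    rw [PySem.List.pyRange_one_eq_nil (by omega)]
    simp [hdLoopA, hdGreedy]
  | succ k ih =>
    intro a b n need skip hk h0 h1 hneed
    have hab : a < b := by omega
    rw [PySem.List.pyRange_one_cons hab]
    by_cases hm : (PySem.List.pyGet? xs a == PySem.List.pyGet? xs (a + 1)) = true
    · cases skip with
      | true =>
        simp only [if_true] at hneed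
        subst hneed
        simp [hdLoopA, hdGreedy, hm,
          show ¬ (n ≥ 2) from by omega, show ¬ (a ≥ a + 1) from by omega]
        exact ih (a+1) b n (a+1) false (by omega) h0 h1 (by norm_num)
      | false =>
        norm_num at hneed
        simp [hdLoopA, hdGreedy, hm, show a ≥ need from by omega]
        rcases (show n = 0 ∨ n = 1 from by omega) with h | h
        · subst h
          exact ih (a+1) b 1 (a+2) true (by omega) (by norm_num) (by norm_num) (by simp; omega)
        · subst h
          norm_num
    · simp only [Bool.not_eq_true] at hm
      cases skip with
      | true =>
        simp only [if_true] at hneed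
        subst hneed
        simp [hdLoopA, hm, show ¬ (n ≥ 2) from by omega]
        exact ih (a+1) b n (a+1) false (by omega) h0 h1 (by norm_num)
      | false =>
        norm_num at hneed
        simp [hdLoopA, hm, show ¬ (n ≥ 2) from by omega]
        exact ih (a+1) b n need false (by omega) h0 h1 (by simp; omega)

-- ===== VERDICT (by name: the statement is the Claim_ definition above) =====
theorem has_douples_spec : Claim_equal_has_douples := by
  intro xs _
  unfold Spec_has_douples has_douples has_douples_alt
  exact hd_inv xs ((((xs.length : Int) - 1) - 0).toNat) 0 ((xs.length : Int) - 1) 0 0 false rfl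
    (le_refl 0) (by norm_num) (by norm_num)
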